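-- pv_equiv track=rewrite | github.com/kot-begem0t/sql_4 | main.py | processing_name
-- ===== SOURCE A (Python) =====
-- import string
--
-- def processing_name(name: str):
--     """
--
--     """
--     lower = list(string.ascii_lowercase)
--     upper = list(string.ascii_uppercase)
--     name_s = str(name)
--     res = []
--     for l in name_s:
--         if (l in lower) or (l in upper):
--             res.append(l.lower())
--         else:
--             return 'need use only english letters'
--     n = res[0].upper()
--     res[0] = n
--     return ''.join(res)
-- ===== SOURCE B (Python) =====
-- def processing_name(name: str):
--     name_s = str(name)
--     if all('a' <= c <= 'z' or 'A' <= c <= 'Z' for c in name_s):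
--         return name_s[0].upper() + name_s[1:].lower()
--     return 'need use only english letters'
-- ===== Notes on version B (the rewrite author's own statement) =====
-- stated objective: simpler
-- what changed: replaces the per-character accumulator loop (each char scanned against two 26-element lists, early return on failure) by one whole-string validity test using character-range comparisons followed by a slice-based transform (first char upper + rest lower); no letter tables and no result list
import Mathlib
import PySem

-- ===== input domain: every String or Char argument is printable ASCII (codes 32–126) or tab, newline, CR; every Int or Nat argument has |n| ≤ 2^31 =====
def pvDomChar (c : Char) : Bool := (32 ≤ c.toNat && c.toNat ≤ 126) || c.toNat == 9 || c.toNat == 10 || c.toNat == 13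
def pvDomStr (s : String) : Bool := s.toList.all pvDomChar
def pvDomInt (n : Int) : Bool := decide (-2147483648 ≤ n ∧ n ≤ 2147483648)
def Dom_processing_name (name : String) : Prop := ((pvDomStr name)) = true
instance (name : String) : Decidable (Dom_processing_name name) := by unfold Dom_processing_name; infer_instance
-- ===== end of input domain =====

-- B replaces A's per-character accumulator loop (scanning two 26-element letter lists,
-- early return) by one whole-string range-comparison validity test followed by a
-- slice-style transform (first char upper + rest lower): simpler, same values.

-- ===== PORT A =====
def pvLowerA : List Char := ['a', 'b', 'c', 'd', 'e', 'f', 'g', 'h', 'i', 'j', 'k', 'l', 'm', 'n', 'o', 'p', 'q', 'r', 's', 't', 'u', 'v', 'w', 'x', 'y', 'z']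
def pvUpperA : List Char := ['A', 'B', 'C', 'D', 'E', 'F', 'G', 'H', 'I', 'J', 'K', 'L', 'M', 'N', 'O', 'P', 'Q', 'R', 'S', 'T', 'U', 'V', 'W', 'X', 'Y', 'Z']

-- the for-loop with early return: accumulate lowered chars, none = early return
def pvLoopA : List Char → List Char → Option (List Char)
  | [], acc => some acc.reverse
  | c :: cs, acc =>
      if pvLowerA.contains c || pvUpperA.contains c then
        pvLoopA cs (PySem.Chars.lowerChar c :: acc)
      else none

def processing_name (name : String) : String :=
  match pvLoopA name.toList [] with
  | none => "need use only english letters"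
  | some [] => ""   -- Python raises IndexError at res[0] here (empty name); excluded by Pre_
  | some (c :: cs) => String.mk (PySem.Chars.upperChar c :: cs)

-- ===== PORT B =====
-- 'a' <= c <= 'z' or 'A' <= c <= 'Z'
def pvIsEng (c : Char) : Bool := ('a' ≤ c && c ≤ 'z') || ('A' ≤ c && c ≤ 'Z')

def processing_name_alt (name : String) : String :=
  if name.toList.all pvIsEng then
    match name.toList with
    | [] => ""    -- Python raises IndexError at name_s[0] here; excluded by Pre_
    | c :: rest => String.mk (PySem.Chars.upper [c] ++ PySem.Chars.lower rest)
  else "need use only english letters"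

-- ===== PRECONDITION & SPEC =====
-- Pre_ excludes only the empty string, on which both A and B raise IndexError.
def Pre_processing_name (name : String) : Prop := name ≠ ""
instance (name : String) : Decidable (Pre_processing_name name) := by unfold Pre_processing_name; infer_instance
def pvWitness_processing_name : String := "Ab"

def Spec_processing_name (name : String) (out : String) : Prop := out = processing_name_alt name
instance (name : String) (out : String) : Decidable (Spec_processing_name name out) := by unfold Spec_processing_name; infer_instance

-- ===== CLAIM (what is proved, stated in full; the proofs are below) =====
def Claim_equal_processing_name : Prop := ∀ (name : String), Dom_processing_name name → Pre_processing_name name → Spec_processing_name name (processing_name name)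

-- ===== LEMMAS AND PROOFS =====

theorem pvMemLower (c : Char) : c ∈ pvLowerA ↔ ('a' ≤ c ∧ c ≤ 'z') := by
  simp [pvLowerA, Char.le_def, Char.ext_iff, UInt32.le_iff_toNat_le, UInt32.ext_iff, UInt32.toNat_ofNat]
  constructor
  · rintro (h|h|h|h|h|h|h|h|h|h|h|h|h|h|h|h|h|h|h|h|h|h|h|h|h|h) <;> omega
  · intro h; omega

theorem pvMemUpper (c : Char) : c ∈ pvUpperA ↔ ('A' ≤ c ∧ c ≤ 'Z') := by
  simp [pvUpperA, Char.le_def, Char.ext_iff, UInt32.le_iff_toNat_le, UInt32.ext_iff, UInt32.toNat_ofNat]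
  constructor
  · rintro (h|h|h|h|h|h|h|h|h|h|h|h|h|h|h|h|h|h|h|h|h|h|h|h|h|h) <;> omega
  · intro h; omega

theorem pvLetterEquiv (c : Char) :
    (pvLowerA.contains c || pvUpperA.contains c) = pvIsEng c := by
  simp [pvIsEng, List.contains_eq_mem, pvMemLower, pvMemUpper, Bool.or_comm]

theorem pvUpperLower (c : Char) (h : pvIsEng c = true) :
    PySem.Chars.upperChar (PySem.Chars.lowerChar c) = PySem.Chars.upperChar c := by
  have hm : c ∈ pvLowerA ++ pvUpperA := by
    rw [List.mem_append, pvMemLower, pvMemUpper]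
    simpa [pvIsEng, decide_eq_true_iff] using h
  fin_cases hm <;> rfl

theorem pvLoopA_eq (cs acc : List Char) :
    pvLoopA cs acc =
      if cs.all pvIsEng then some (acc.reverse ++ PySem.Chars.lower cs)
      else none := by
  induction cs generalizing acc with
  | nil => simp [pvLoopA, PySem.Chars.lower]
  | cons c cs ih =>
    simp only [pvLoopA, pvLetterEquiv, List.all_cons]
    by_cases h : pvIsEng c = true
    · simp [h, ih, PySem.Chars.lower]
    · simp [h]

-- ===== VERDICT (by name: the statement is the Claim_ definition above) =====
theorem processing_name_spec : Claim_equal_processing_name := by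
  intro name _ hpre
  unfold Spec_processing_name processing_name processing_name_alt
  rw [pvLoopA_eq]
  by_cases h : (name.toList.all pvIsEng) = true
  · simp only [if_pos h]
    cases hl : name.toList with
    | nil =>
      have : name = "" := by
        have := congrArg String.ofList hl
        simpa using this
      exact absurd this hpre
    | cons c rest =>
      have hc : pvIsEng c = true := by
        rw [hl, List.all_cons] at h
        simp at h; exact h.1
      simp [PySem.Chars.lower, PySem.Chars.upper, pvUpperLower c hc]
  · simp only [if_neg h]
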